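-- pv_equiv track=rewrite | github.com/jylxy/jy_option | src/query_filters.py | normalize_sql_values
-- ===== SOURCE A (Python) =====
-- def normalize_sql_values(values):
--     """Return sorted unique non-empty SQL values."""
--     normalized = []
--     for value in values:
--         if value is None:
--             continue
--         text = str(value).strip()
--         if text:
--             normalized.append(text)
--     return sorted(set(normalized))
-- ===== SOURCE B (Python) =====
-- def normalize_sql_values(values):
--     """Return sorted unique non-empty SQL values."""
--     ordered = sorted(str(v).strip() for v in values if v is not None)
--     out = []
--     for text in ordered:
--         if text and (not out or out[-1] != text):
--             out.append(text)
--     return out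
-- ===== Notes on version B (the rewrite author's own statement) =====
-- stated objective: alternative
-- what changed: Sort the stripped values first and deduplicate (and drop empties) in a single adjacency scan comparing each element with the last kept one, instead of building a hash set and sorting its contents.
import Mathlib
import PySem

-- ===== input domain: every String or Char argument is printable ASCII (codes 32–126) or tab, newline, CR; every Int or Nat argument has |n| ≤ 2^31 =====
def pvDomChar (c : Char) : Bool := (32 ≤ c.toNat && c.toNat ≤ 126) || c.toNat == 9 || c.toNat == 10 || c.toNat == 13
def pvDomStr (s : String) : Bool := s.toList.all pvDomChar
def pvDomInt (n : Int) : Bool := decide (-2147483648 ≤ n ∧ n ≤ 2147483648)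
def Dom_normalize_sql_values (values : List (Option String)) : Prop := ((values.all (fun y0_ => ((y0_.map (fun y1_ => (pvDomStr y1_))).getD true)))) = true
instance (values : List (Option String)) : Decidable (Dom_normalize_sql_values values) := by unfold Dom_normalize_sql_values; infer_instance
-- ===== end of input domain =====

-- B sorts the stripped values first and removes empties and duplicates in one
-- adjacency scan (compare with the last kept element) instead of building a
-- hash set and sorting its contents; same cost, different dedup mechanism.

-- ===== PORT A =====
def normalize_sql_values (values : List (Option String)) : List String :=
  let normalized := values.foldl (fun acc value =>
    match value with
    | none => acc
    | some v =>
      let text := PySem.Str.strip v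
      if text ≠ "" then acc ++ [text] else acc) []
  PySem.List.sorted (PySem.Set.ofList normalized) (fun x => x) false

-- ===== PORT B =====
def normalize_sql_values_alt (values : List (Option String)) : List String :=
  let ordered := PySem.List.sorted (values.filterMap (fun v => v.map PySem.Str.strip)) (fun x => x) false
  ordered.foldl (fun out text =>
    if text ≠ "" ∧ out.getLast? ≠ some text then out ++ [text] else out) []

-- ===== PRECONDITION & SPEC =====
def Spec_normalize_sql_values (values : List (Option String)) (out : List String) : Prop := out = normalize_sql_values_alt values
instance (values : List (Option String)) (out : List String) : Decidable (Spec_normalize_sql_values values out) := by unfold Spec_normalize_sql_values; infer_instance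

-- ===== CLAIM (what is proved, stated in full; the proofs are below) =====
def Claim_equal_normalize_sql_values : Prop := ∀ (values : List (Option String)), Dom_normalize_sql_values values → Spec_normalize_sql_values values (normalize_sql_values values)

-- ===== LEMMAS AND PROOFS =====

-- adjacency dedup of a run, skipping empties, remembering the last kept element
def dedupNE : Option String → List String → List String
  | _, [] => []
  | prev, x :: t =>
    if x = "" ∨ prev = some x then dedupNE prev t else x :: dedupNE (some x) t

lemma dedupNE_cons (prev : Option String) (x : String) (t : List String) :
    dedupNE prev (x :: t)
    = if x = "" ∨ prev = some x then dedupNE prev t else x :: dedupNE (some x) t := rfl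

lemma foldl_dedupNE : ∀ (s acc : List String),
    s.foldl (fun out text =>
      if text ≠ "" ∧ out.getLast? ≠ some text then out ++ [text] else out) acc
    = acc ++ dedupNE acc.getLast? s := by
  intro s
  induction s with
  | nil => intro acc; simp [dedupNE]
  | cons x t ih =>
    intro acc
    simp only [List.foldl_cons, dedupNE_cons]
    by_cases h : x ≠ "" ∧ acc.getLast? ≠ some x
    · rw [if_pos h, if_neg (fun hc => hc.elim h.1 h.2), ih]
      have hlast : (acc ++ [x]).getLast? = some x := by simp
      rw [hlast]
      simp
    -- skip step: the accumulator (hence its last element) is unchanged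
    · rw [if_neg h, if_pos, ih]
      by_cases hx : x = ""
      · exact Or.inl hx
      · exact Or.inr (not_not.mp (fun hg => h ⟨hx, hg⟩))

lemma dedupNE_spec : ∀ (s : List String) (prev : Option String),
    s.Pairwise (· ≤ ·) →
    (∀ p, prev = some p → p ≠ "" ∧ ∀ y ∈ s, p ≤ y) →
    (dedupNE prev s).Pairwise (· < ·) ∧
      ∀ z, z ∈ dedupNE prev s ↔ z ∈ s ∧ z ≠ "" ∧ prev ≠ some z := by
  intro s
  induction s with
  | nil => intro prev _ _; simp [dedupNE]
  | cons x t ih =>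
    intro prev hs hp
    have hx : ∀ y ∈ t, x ≤ y := (List.pairwise_cons.mp hs).1
    have ht : t.Pairwise (· ≤ ·) := (List.pairwise_cons.mp hs).2
    rw [dedupNE_cons]
    by_cases h : x = "" ∨ prev = some x
    · rw [if_pos h]
      have hp' : ∀ p, prev = some p → p ≠ "" ∧ ∀ y ∈ t, p ≤ y := by
        intro p hpp
        exact ⟨(hp p hpp).1, fun y hy => (hp p hpp).2 y (List.mem_cons_of_mem _ hy)⟩
      obtain ⟨pw, hm⟩ := ih prev ht hp'
      refine ⟨pw, fun z => ?_⟩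
      rw [hm z]
      constructor
      · rintro ⟨hz, hne, hpz⟩; exact ⟨List.mem_cons_of_mem _ hz, hne, hpz⟩
      · rintro ⟨hz, hne, hpz⟩
        rcases List.mem_cons.mp hz with rfl | hz'
        · rcases h with h | h
          · exact absurd h hne
          · exact absurd h hpz
        · exact ⟨hz', hne, hpz⟩
    · rw [if_neg h]
      rw [not_or] at h
      obtain ⟨hxne, hprev⟩ := h
      have hp'' : ∀ p, some x = some p → p ≠ "" ∧ ∀ y ∈ t, p ≤ y := by
        intro p hpp
        obtain rfl : x = p := Option.some.inj hpp
        exact ⟨hxne, hx⟩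
      obtain ⟨pw, hm⟩ := ih (some x) ht hp''
      constructor
      · refine List.pairwise_cons.mpr ⟨?_, pw⟩
        intro z hz
        obtain ⟨hzt, _, hzx⟩ := (hm z).mp hz
        exact lt_of_le_of_ne (hx z hzt) (fun he => hzx (congrArg some he))
      · intro z
        rw [List.mem_cons, hm z]
        constructor
        · rintro (rfl | ⟨hzt, hzne, hzx⟩)
          · exact ⟨List.mem_cons_self, hxne, hprev⟩
          · refine ⟨List.mem_cons_of_mem _ hzt, hzne, fun hpz => ?_⟩
            obtain ⟨_, hple⟩ := hp z hpz
            exact hzx (congrArg some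
              (le_antisymm (hple x List.mem_cons_self) (hx z hzt)).symm)
        · rintro ⟨hz, hzne, hpz⟩
          rcases List.mem_cons.mp hz with rfl | hzt
          · exact Or.inl rfl
          · by_cases hzx : x = z
            · exact Or.inl hzx.symm
            · exact Or.inr ⟨hzt, hzne, fun hc => hzx (Option.some.inj hc)⟩

lemma normA_eq_filter : ∀ (values : List (Option String)) (acc : List String),
    values.foldl (fun acc value =>
      match value with
      | none => acc
      | some v =>
        let text := PySem.Str.strip v
        if text ≠ "" then acc ++ [text] else acc) acc
    = acc ++ (values.filterMap (fun v => v.map PySem.Str.strip)).filter (fun t => t ≠ "") := by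
  intro values
  induction values with
  | nil => intro acc; simp
  | cons v vs ih =>
    intro acc
    cases v with
    | none => simpa using ih acc
    | some s =>
      simp only [List.foldl_cons, List.filterMap_cons, Option.map_some]
      by_cases hne : PySem.Str.strip s ≠ ""
      · rw [if_pos hne, ih]
        simp [hne]
      · rw [if_neg hne, ih]
        rw [not_not] at hne
        simp [hne]

-- ===== VERDICT (by name: the statement is the Claim_ definition above) =====
theorem normalize_sql_values_spec : Claim_equal_normalize_sql_values := by
  intro values _
  unfold Spec_normalize_sql_values normalize_sql_values normalize_sql_values_alt
  simp only []
  set allS := values.filterMap (fun v => v.map PySem.Str.strip) with hallS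
  set ordered := PySem.List.sorted allS (fun x => x) false with hord
  rw [normA_eq_filter values []]
  rw [foldl_dedupNE ordered []]
  simp only [List.nil_append, List.getLast?_nil]
  have hpair : ordered.Pairwise (· ≤ ·) := PySem.List.sorted_pairwise allS (fun x => x)
  obtain ⟨pw, hm⟩ := dedupNE_spec ordered none hpair (by intro p hp; cases hp)
  refine PySem.List.sorted_eq_of_perm_of_pairwise_lt _ _ _ ?_ ?_
  · refine ((List.perm_ext_iff_of_nodup ?_ ?_).mpr ?_)
    · exact pw.imp (fun {a b} h => ne_of_lt h)
    · exact PySem.Set.nodup_ofList _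
    · intro z
      rw [hm z, PySem.Set.mem_ofList, List.mem_filter, hord, PySem.List.mem_sorted]
      constructor
      · rintro ⟨h1, h2, _⟩; exact ⟨h1, by simpa using h2⟩
      · rintro ⟨h1, h2⟩; exact ⟨h1, by simpa using h2, by simp⟩
  · exact pw
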